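-- pv_equiv track=rewrite | github.com/Deepak-0318/UnderstandAI | core/ingestion/text_cleaner.py | fix_line_wrapping
-- ===== SOURCE A (Python) =====
-- def fix_line_wrapping(text: str) -> str:
--     """
--     Joins lines that were broken due to PDF line wrapping.
--     """
--     lines = text.split("\n")
--     fixed = []
--
--     buffer = ""
--
--     for line in lines:
--         stripped = line.strip()
--
--         if not stripped:
--             if buffer:
--                 fixed.append(buffer.strip())
--                 buffer = ""
--             continue
--
--         # If line does NOT end with sentence punctuation, it's likely wrapped
--         if not stripped.endswith((".", "!", "?")):
--             buffer += stripped + " "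
--         else:
--             buffer += stripped
--             fixed.append(buffer.strip())
--             buffer = ""
--
--     if buffer:
--         fixed.append(buffer.strip())
--
--     return "\n".join(fixed)
-- ===== SOURCE B (Python) =====
-- def fix_line_wrapping(text: str) -> str:
--     """
--     Joins lines that were broken due to PDF line wrapping.
--
--     Two-level structure: group stripped lines into maximal blocks of
--     non-blank lines, then segment each block into sentences at lines
--     ending with '.', '!' or '?'.
--     """
--     stripped = [line.strip() for line in text.split("\n")]
--
--     # group into maximal blocks of non-blank stripped lines
--     blocks = []
--     cur = []
--     for s in stripped:
--         if s:
--             cur.append(s)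
--         elif cur:
--             blocks.append(cur)
--             cur = []
--     if cur:
--         blocks.append(cur)
--
--     # segment each block into sentences
--     sentences = []
--     for block in blocks:
--         acc = []
--         for s in block:
--             acc.append(s)
--             if s.endswith((".", "!", "?")):
--                 sentences.append(" ".join(acc))
--                 acc = []
--         if acc:
--             sentences.append(" ".join(acc))
--
--     return "\n".join(sentences)
-- ===== Notes on version B (the rewrite author's own statement) =====
-- stated objective: alternative
-- what changed: Replaced the single-pass string-buffer state machine with a two-level decomposition: first group stripped lines into maximal blocks of non-blank lines, then segment each block into sentences at punctuation-ended lines, joining accumulated line lists instead of growing a buffer string.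
import Mathlib
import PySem

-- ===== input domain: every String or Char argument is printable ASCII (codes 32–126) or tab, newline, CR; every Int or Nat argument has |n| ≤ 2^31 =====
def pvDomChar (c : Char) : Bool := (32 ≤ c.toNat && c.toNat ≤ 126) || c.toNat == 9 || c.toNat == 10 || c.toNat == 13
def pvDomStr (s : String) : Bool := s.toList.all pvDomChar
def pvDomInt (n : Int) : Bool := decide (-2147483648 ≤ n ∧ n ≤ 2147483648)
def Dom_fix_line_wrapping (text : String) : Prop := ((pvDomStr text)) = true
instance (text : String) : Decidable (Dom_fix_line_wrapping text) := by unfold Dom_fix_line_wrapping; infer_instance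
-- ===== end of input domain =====

-- B replaces A's single-pass string-buffer state machine by a two-level grouping
-- (blocks of non-blank lines, then per-block sentence segmentation); alternative
-- decomposition of the same cost.

-- ===== PORT A =====
-- literal step for A's 'for line in lines' loop; state = (fixed, buffer)
def pvStepA (st : List String × String) (line : String) : List String × String :=
  let stripped := PySem.Str.strip line
  if stripped = "" then
    if st.2 ≠ "" then (st.1 ++ [PySem.Str.strip st.2], "") else st
  else if ¬(PySem.Str.endswith stripped "." || PySem.Str.endswith stripped "!" ||
            PySem.Str.endswith stripped "?") then
    (st.1, st.2 ++ stripped ++ " ")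
  else
    (st.1 ++ [PySem.Str.strip (st.2 ++ stripped)], "")

def fix_line_wrapping (text : String) : String :=
  let lines : List String := (PySem.Str.split? text "\n").getD []
  let st := lines.foldl pvStepA ([], "")
  let fixed := if st.2 ≠ "" then st.1 ++ [PySem.Str.strip st.2] else st.1
  PySem.Str.join "\n" fixed

-- ===== PORT B =====
-- Source B's grouping loop: state = (blocks, cur)
def pvGroupStep (st : List (List String) × List String) (s : String) :
    List (List String) × List String :=
  if s ≠ "" then (st.1, st.2 ++ [s])
  else if st.2 ≠ [] then (st.1 ++ [st.2], []) else st

-- Source B's inner segmentation step: state = (sentences, acc)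
def pvSegStep (st : List String × List String) (s : String) : List String × List String :=
  let acc := st.2 ++ [s]
  if PySem.Str.endswith s "." || PySem.Str.endswith s "!" || PySem.Str.endswith s "?" then
    (st.1 ++ [PySem.Str.join " " acc], [])
  else
    (st.1, acc)

-- Source B's per-block pass (inner loop plus the 'if acc' flush after it)
def pvSegBlock (sentences : List String) (block : List String) : List String :=
  let st := block.foldl pvSegStep (sentences, [])
  if st.2 ≠ [] then st.1 ++ [PySem.Str.join " " st.2] else st.1

def fix_line_wrapping_alt (text : String) : String :=
  let stripped : List String := ((PySem.Str.split? text "\n").getD []).map PySem.Str.strip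
  let g := stripped.foldl pvGroupStep ([], [])
  let blocks := if g.2 ≠ [] then g.1 ++ [g.2] else g.1
  let sentences := blocks.foldl pvSegBlock []
  PySem.Str.join "\n" sentences

-- ===== PRECONDITION & SPEC =====
def Spec_fix_line_wrapping (text : String) (out : String) : Prop := out = fix_line_wrapping_alt text
instance (text : String) (out : String) : Decidable (Spec_fix_line_wrapping text out) := by unfold Spec_fix_line_wrapping; infer_instance

-- ===== CLAIM (what is proved, stated in full; the proofs are below) =====
def Claim_equal_fix_line_wrapping : Prop := ∀ (text : String), Dom_fix_line_wrapping text → Spec_fix_line_wrapping text (fix_line_wrapping text)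


-- ===== LEMMAS AND PROOFS =====

-- "nice" char lists: nonempty, no leading or trailing whitespace (the shape of a
-- nonempty stripped line)
def pvNiceC (cs : List Char) : Prop :=
  cs ≠ [] ∧ (∀ c, cs.head? = some c → PySem.Chars.isspace c = false) ∧
    (∀ c, cs.getLast? = some c → PySem.Chars.isspace c = false)

def pvNiceS (s : String) : Prop := pvNiceC s.toList

-- A's buffer as a function of B's accumulated line list
def pvSp : List String → String
  | [] => ""
  | x :: xs => x ++ " " ++ pvSp xs

def pvSpc : List (List Char) → List Char
  | [] => []
  | x :: xs => x ++ ' ' :: pvSpc xs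

lemma pvSp_toList (l : List String) : (pvSp l).toList = pvSpc (l.map String.toList) := by
  induction l with
  | nil => rfl
  | cons x xs ih => simp [pvSp, pvSpc, String.toList_append, ih]

lemma pvSp_snoc (xs : List String) (s : String) :
    pvSp (xs ++ [s]) = (pvSp xs ++ s) ++ " " := by
  induction xs with
  | nil => simp [pvSp]
  | cons x xs ih => simp [pvSp, ih, String.append_assoc]

lemma pvSp_eq_empty_iff (l : List String) : pvSp l = "" ↔ l = [] := by
  cases l with
  | nil => simp [pvSp]
  | cons x xs =>
    simp only [pvSp]
    constructor
    · intro h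
      have := congrArg String.toList h
      simp [String.toList_append] at this
    · intro h; cases h

lemma pvDropWhile_eq_self (p : Char → Bool) (m : List Char)
    (hp : ∀ c, m.head? = some c → p c = false) : m.dropWhile p = m := by
  cases m with
  | nil => rfl
  | cons c r => simp [hp c (by simp)]

lemma pvDropWhile_head?_not (p : Char → Bool) (l : List Char) (c : Char)
    (h : (l.dropWhile p).head? = some c) : p c = false := by
  have hne : l.dropWhile p ≠ [] := by intro h0; rw [h0] at h; simp at h
  have := List.head?_eq_some_head hne
  rw [this] at h
  rw [← Option.some.inj h]
  exact List.head_dropWhile_not p hne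

lemma pvRstrip_nice (cs : List Char) (h : pvNiceC cs) :
    (List.dropWhile PySem.Chars.isspace cs.reverse).reverse = cs := by
  rw [pvDropWhile_eq_self _ _ (fun c hc => h.2.2 c (by rwa [List.head?_reverse] at hc)),
    List.reverse_reverse]

lemma pvStrip_nice (cs : List Char) (h : pvNiceC cs) : PySem.Chars.strip cs = cs := by
  unfold PySem.Chars.strip PySem.Chars.lstrip PySem.Chars.rstrip
  rw [pvDropWhile_eq_self _ _ h.2.1]
  exact pvRstrip_nice cs h

lemma pvStrip_snoc_space (cs : List Char) (h : pvNiceC cs) :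
    PySem.Chars.strip (cs ++ [' ']) = cs := by
  obtain ⟨hne, hh, hl⟩ := h
  unfold PySem.Chars.strip PySem.Chars.lstrip PySem.Chars.rstrip
  rw [pvDropWhile_eq_self _ (cs ++ [' '])
    (fun c hc => hh c (by rwa [List.head?_append_of_ne_nil cs hne] at hc))]
  rw [show (cs ++ [' ']).reverse = ' ' :: cs.reverse by simp]
  rw [List.dropWhile_cons]
  simp only [show PySem.Chars.isspace ' ' = true from rfl, if_true]
  exact pvRstrip_nice cs ⟨hne, hh, hl⟩

lemma pvNice_strip (l : List Char) (h : PySem.Chars.strip l ≠ []) :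
    pvNiceC (PySem.Chars.strip l) := by
  unfold PySem.Chars.strip PySem.Chars.lstrip PySem.Chars.rstrip at *
  refine ⟨h, fun c hc => ?_, fun c hc => ?_⟩
  · have hpre :
        ((l.dropWhile PySem.Chars.isspace).reverse.dropWhile PySem.Chars.isspace).reverse
          <+: l.dropWhile PySem.Chars.isspace := by
      simpa using List.reverse_prefix.mpr
        (List.dropWhile_suffix (l := (l.dropWhile PySem.Chars.isspace).reverse)
          PySem.Chars.isspace)
    obtain ⟨t, ht⟩ := hpre
    rw [← List.head?_append_of_ne_nil _ h (l₂ := t), ht] at hc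
    exact pvDropWhile_head?_not _ _ _ hc
  · rw [List.getLast?_reverse] at hc
    exact pvDropWhile_head?_not _ _ _ hc

lemma pvNiceS_strip (l : String) (h : PySem.Str.strip l ≠ "") :
    pvNiceS (PySem.Str.strip l) := by
  unfold pvNiceS
  rw [PySem.Str.toList_strip]
  apply pvNice_strip
  rw [← PySem.Str.toList_strip]
  rw [ne_eq, ← String.toList_eq_nil_iff] at h
  exact h

lemma pvJoin_snoc (L : List (List Char)) (s : List Char) :
    pvSpc L ++ s = PySem.Chars.join [' '] (L ++ [s]) := by
  induction L with
  | nil => simp [pvSpc, PySem.Chars.join_singleton]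
  | cons x xs ih =>
    cases xs with
    | nil => simp [pvSpc, PySem.Chars.join_cons_cons, PySem.Chars.join_singleton]
    | cons y ys =>
      calc pvSpc (x :: y :: ys) ++ s = x ++ [' '] ++ (pvSpc (y :: ys) ++ s) := by
            simp [pvSpc]
        _ = x ++ [' '] ++ PySem.Chars.join [' '] ((y :: ys) ++ [s]) := by rw [ih]
        _ = PySem.Chars.join [' '] ((x :: y :: ys) ++ [s]) := by
            simp [PySem.Chars.join_cons_cons]

lemma pvSpc_eq_join (L : List (List Char)) (h : L ≠ []) :
    pvSpc L = PySem.Chars.join [' '] L ++ [' '] := by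
  induction L with
  | nil => simp at h
  | cons x xs ih =>
    cases xs with
    | nil => simp [pvSpc, PySem.Chars.join_singleton]
    | cons y ys =>
      calc pvSpc (x :: y :: ys) = x ++ [' '] ++ pvSpc (y :: ys) := by simp [pvSpc]
        _ = x ++ [' '] ++ (PySem.Chars.join [' '] (y :: ys) ++ [' ']) := by
            rw [ih (by simp)]
        _ = (x ++ [' '] ++ PySem.Chars.join [' '] (y :: ys)) ++ [' '] := by
            simp [List.append_assoc]
        _ = PySem.Chars.join [' '] (x :: y :: ys) ++ [' '] := by
            rw [PySem.Chars.join_cons_cons]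

lemma pvNice_join (L : List (List Char)) (hL : ∀ x ∈ L, pvNiceC x) (h : L ≠ []) :
    pvNiceC (PySem.Chars.join [' '] L) := by
  induction L with
  | nil => simp at h
  | cons x xs ih =>
    cases xs with
    | nil =>
      rw [PySem.Chars.join_singleton]
      exact hL x (by simp)
    | cons y ys =>
      rw [PySem.Chars.join_cons_cons]
      obtain ⟨hxne, hxh, hxl⟩ := hL x (by simp)
      obtain ⟨hjne, hjh, hjl⟩ := ih (fun z hz => hL z (by simp [hz])) (by simp)
      refine ⟨by simp, fun c hc => ?_, fun c hc => ?_⟩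
      · rw [List.append_assoc, List.head?_append_of_ne_nil x hxne] at hc
        exact hxh c hc
      · rw [List.getLast?_append_of_ne_nil _ hjne] at hc
        exact hjl c hc

-- the two string facts the invariant needs
lemma pvStrip_sp_append (acc : List String) (s : String)
    (ha : ∀ x ∈ acc, pvNiceS x) (hs : pvNiceS s) :
    PySem.Str.strip (pvSp acc ++ s) = PySem.Str.join " " (acc ++ [s]) := by
  apply String.toList_inj.mp
  rw [PySem.Str.toList_strip, String.toList_append, pvSp_toList, PySem.Str.toList_join]
  rw [show (" " : String).toList = [' '] from rfl, List.map_append, List.map_cons,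
    List.map_nil, pvJoin_snoc]
  apply pvStrip_nice
  apply pvNice_join
  · intro x hx
    rcases List.mem_append.mp hx with hx | hx
    · obtain ⟨y, hy, rfl⟩ := List.mem_map.mp hx
      exact ha y hy
    · rw [List.mem_singleton.mp hx]; exact hs
  · simp

lemma pvStrip_sp (acc : List String) (ha : ∀ x ∈ acc, pvNiceS x) (h : acc ≠ []) :
    PySem.Str.strip (pvSp acc) = PySem.Str.join " " acc := by
  apply String.toList_inj.mp
  rw [PySem.Str.toList_strip, pvSp_toList, PySem.Str.toList_join,
    show (" " : String).toList = [' '] from rfl]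
  rw [pvSpc_eq_join _ (by simpa using h)]
  apply pvStrip_snoc_space
  apply pvNice_join
  · intro x hx
    obtain ⟨y, hy, rfl⟩ := List.mem_map.mp hx
    exact ha y hy
  · simpa using h

-- fold bookkeeping
lemma pvSegStep_shift (cur : List String) : ∀ (E a : List String),
    cur.foldl pvSegStep (E, a) =
      (E ++ (cur.foldl pvSegStep ([], a)).1, (cur.foldl pvSegStep ([], a)).2) := by
  induction cur with
  | nil => intro E a; simp
  | cons s cur ih =>
    intro E a
    simp only [List.foldl_cons]
    by_cases h : (PySem.Str.endswith s "." || PySem.Str.endswith s "!" ||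
        PySem.Str.endswith s "?") = true
    · simp only [pvSegStep, h, if_true]
      rw [ih (E ++ [PySem.Str.join " " (a ++ [s])]) [],
        ih ([] ++ [PySem.Str.join " " (a ++ [s])]) []]
      simp
    · simp only [pvSegStep, h]
      exact ih E (a ++ [s])

lemma pvSegBlock_shift (block : List String) (S : List String) :
    pvSegBlock S block = S ++ pvSegBlock [] block := by
  simp only [pvSegBlock]
  rw [pvSegStep_shift block S []]
  split_ifs with h1
  · simp [List.append_assoc]
  · rfl

lemma pvSegAcc_mem (cur : List String) : ∀ (E a : List String) (x : String),
    x ∈ (cur.foldl pvSegStep (E, a)).2 → x ∈ a ∨ x ∈ cur := by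
  induction cur with
  | nil => intro E a x hx; exact Or.inl hx
  | cons s cur ih =>
    intro E a x hx
    simp only [List.foldl_cons] at hx
    by_cases h : (PySem.Str.endswith s "." || PySem.Str.endswith s "!" ||
        PySem.Str.endswith s "?") = true
    · simp only [pvSegStep, h, if_true] at hx
      rcases ih _ _ x hx with hx | hx
      · cases hx
      · exact Or.inr (List.mem_cons_of_mem s hx)
    · simp only [pvSegStep, h] at hx
      rcases ih _ _ x hx with hx | hx
      · rcases List.mem_append.mp hx with hx | hx
        · exact Or.inl hx
        · exact Or.inr (by simp [List.mem_singleton.mp hx])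
      · exact Or.inr (List.mem_cons_of_mem s hx)

lemma pvBlocksSnoc (blocks : List (List String)) (cur : List String) :
    (blocks ++ [cur]).foldl pvSegBlock [] =
      blocks.foldl pvSegBlock [] ++ pvSegBlock [] cur := by
  rw [List.foldl_append, List.foldl_cons, List.foldl_nil]
  exact pvSegBlock_shift cur (blocks.foldl pvSegBlock [])

lemma pvSegBlock0 (cur : List String) :
    pvSegBlock [] cur =
      (if (cur.foldl pvSegStep ([], [])).2 ≠ [] then
        (cur.foldl pvSegStep ([], [])).1 ++
          [PySem.Str.join " " (cur.foldl pvSegStep ([], [])).2]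
      else (cur.foldl pvSegStep ([], [])).1) := rfl

-- main invariant: A's loop run from a state describing B's partially grouped input
lemma pvSp_nil : pvSp [] = "" := rfl

lemma pvMain : ∀ (ls : List String) (blocks : List (List String)) (cur : List String),
    (∀ x ∈ cur, pvNiceS x) →
    (let st := ls.foldl pvStepA
        (blocks.foldl pvSegBlock [] ++ (cur.foldl pvSegStep ([], [])).1,
         pvSp (cur.foldl pvSegStep ([], [])).2)
     if st.2 ≠ "" then st.1 ++ [PySem.Str.strip st.2] else st.1)
    =
    (let g := (ls.map PySem.Str.strip).foldl pvGroupStep (blocks, cur)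
     (if g.2 ≠ [] then g.1 ++ [g.2] else g.1).foldl pvSegBlock []) := by
  intro ls
  induction ls with
  | nil =>
    intro blocks cur hc
    simp only [List.foldl_nil, List.map_nil]
    by_cases hcur : cur = []
    · subst hcur
      simp [pvSp_nil]
    · have haNice : ∀ x ∈ (cur.foldl pvSegStep ([], [])).2, pvNiceS x := by
        intro x hx
        rcases pvSegAcc_mem cur [] [] x hx with hx | hx
        · cases hx
        · exact hc x hx
      rw [if_pos hcur, pvBlocksSnoc]
      by_cases ha : (cur.foldl pvSegStep ([], [])).2 = []
      · rw [pvSegBlock0,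
          if_neg (show ¬((cur.foldl pvSegStep ([], [])).2 ≠ []) by simp [ha]),
          if_neg (show ¬(pvSp (cur.foldl pvSegStep ([], [])).2 ≠ "") by
            simp [ha, pvSp_nil])]
      · rw [pvSegBlock0, if_pos (show (cur.foldl pvSegStep ([], [])).2 ≠ [] from ha),
          if_pos (show pvSp (cur.foldl pvSegStep ([], [])).2 ≠ "" by
            rw [ne_eq, pvSp_eq_empty_iff]; exact ha),
          pvStrip_sp _ haNice ha]
        simp [List.append_assoc]
  | cons l ls IH =>
    intro blocks cur hc
    simp only [List.foldl_cons, List.map_cons]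
    have haNice : ∀ x ∈ (cur.foldl pvSegStep ([], [])).2, pvNiceS x := by
      intro x hx
      rcases pvSegAcc_mem cur [] [] x hx with hx | hx
      · cases hx
      · exact hc x hx
    by_cases hs : PySem.Str.strip l = ""
    · -- blank line: A flushes a non-empty buffer, B closes the current block
      by_cases hcur : cur = []
      · subst hcur
        rw [show pvGroupStep (blocks, ([] : List String)) (PySem.Str.strip l) =
              (blocks, ([] : List String)) by simp [pvGroupStep, hs]]
        rw [show pvStepA (blocks.foldl pvSegBlock [] ++
              (List.foldl pvSegStep ([], []) ([] : List String)).1,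
              pvSp (List.foldl pvSegStep ([], []) ([] : List String)).2) l =
            (blocks.foldl pvSegBlock [] ++
              (List.foldl pvSegStep ([], []) ([] : List String)).1,
              pvSp (List.foldl pvSegStep ([], []) ([] : List String)).2) by
          simp [pvStepA, hs, pvSp_nil]]
        exact IH blocks [] (by intro x hx; cases hx)
      · rw [show pvGroupStep (blocks, cur) (PySem.Str.strip l) =
              (blocks ++ [cur], ([] : List String)) by simp [pvGroupStep, hs, hcur]]
        have hIH := IH (blocks ++ [cur]) [] (by intro x hx; cases hx)
        simp only [List.foldl_nil, pvSp_nil, List.append_nil] at hIH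
        rw [pvBlocksSnoc, pvSegBlock0] at hIH
        by_cases ha : (cur.foldl pvSegStep ([], [])).2 = []
        · rw [show pvStepA (blocks.foldl pvSegBlock [] ++ (cur.foldl pvSegStep ([], [])).1,
                pvSp (cur.foldl pvSegStep ([], [])).2) l =
              (blocks.foldl pvSegBlock [] ++ (cur.foldl pvSegStep ([], [])).1, "") by
            simp [pvStepA, hs, ha, pvSp_nil]]
          rw [if_neg (show ¬((cur.foldl pvSegStep ([], [])).2 ≠ []) by simp [ha])] at hIH
          exact hIH
        · rw [show pvStepA (blocks.foldl pvSegBlock [] ++ (cur.foldl pvSegStep ([], [])).1,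
                pvSp (cur.foldl pvSegStep ([], [])).2) l =
              ((blocks.foldl pvSegBlock [] ++ (cur.foldl pvSegStep ([], [])).1) ++
                [PySem.Str.join " " (cur.foldl pvSegStep ([], [])).2], "") by
            simp only [pvStepA, if_pos hs]
            rw [if_pos (by rw [ne_eq, pvSp_eq_empty_iff]; exact ha),
              pvStrip_sp _ haNice ha]]
          rw [if_pos (show (cur.foldl pvSegStep ([], [])).2 ≠ [] from ha)] at hIH
          simpa [List.append_assoc] using hIH
    · -- non-blank line: B appends the stripped line to the current block
      rw [show pvGroupStep (blocks, cur) (PySem.Str.strip l) =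
            (blocks, cur ++ [PySem.Str.strip l]) by
          simp [pvGroupStep, hs]]
      have hnice : ∀ x ∈ cur ++ [PySem.Str.strip l], pvNiceS x := by
        intro x hx
        rcases List.mem_append.mp hx with hx | hx
        · exact hc x hx
        · rw [List.mem_singleton.mp hx]; exact pvNiceS_strip l hs
      have hIH := IH blocks (cur ++ [PySem.Str.strip l]) hnice
      rw [List.foldl_append, List.foldl_cons, List.foldl_nil] at hIH
      by_cases hend : (PySem.Str.endswith (PySem.Str.strip l) "." ||
          PySem.Str.endswith (PySem.Str.strip l) "!" ||
          PySem.Str.endswith (PySem.Str.strip l) "?") = true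
      · -- sentence end: A emits buffer + line; B's segmentation emits the same sentence
        rw [show pvStepA (blocks.foldl pvSegBlock [] ++ (cur.foldl pvSegStep ([], [])).1,
              pvSp (cur.foldl pvSegStep ([], [])).2) l =
            ((blocks.foldl pvSegBlock [] ++ (cur.foldl pvSegStep ([], [])).1) ++
              [PySem.Str.join " " ((cur.foldl pvSegStep ([], [])).2 ++ [PySem.Str.strip l])], "") by
          simp only [pvStepA]
          rw [if_neg hs, if_neg (not_not_intro hend),
            pvStrip_sp_append _ _ haNice (pvNiceS_strip l hs)]]
        rw [show pvSegStep (cur.foldl pvSegStep ([], [])) (PySem.Str.strip l) =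
            ((cur.foldl pvSegStep ([], [])).1 ++
              [PySem.Str.join " " ((cur.foldl pvSegStep ([], [])).2 ++ [PySem.Str.strip l])], []) by
          simp only [pvSegStep]
          rw [if_pos hend]] at hIH
        simp only [pvSp_nil] at hIH
        simpa [List.append_assoc] using hIH
      · -- wrapped line: A grows the buffer, B grows the accumulator
        rw [show pvStepA (blocks.foldl pvSegBlock [] ++ (cur.foldl pvSegStep ([], [])).1,
              pvSp (cur.foldl pvSegStep ([], [])).2) l =
            (blocks.foldl pvSegBlock [] ++ (cur.foldl pvSegStep ([], [])).1,
              (pvSp (cur.foldl pvSegStep ([], [])).2 ++ PySem.Str.strip l) ++ " ") by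
          simp only [pvStepA]
          rw [if_neg hs, if_pos hend]]
        rw [show pvSegStep (cur.foldl pvSegStep ([], [])) (PySem.Str.strip l) =
            ((cur.foldl pvSegStep ([], [])).1,
              (cur.foldl pvSegStep ([], [])).2 ++ [PySem.Str.strip l]) by
          simp only [pvSegStep]
          rw [if_neg hend]] at hIH
        rw [pvSp_snoc] at hIH
        simpa [String.append_assoc] using hIH

-- ===== VERDICT (by name: the statement is the Claim_ definition above) =====
theorem fix_line_wrapping_spec : Claim_equal_fix_line_wrapping := by
  intro text _
  unfold Spec_fix_line_wrapping fix_line_wrapping fix_line_wrapping_alt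
  have h := pvMain ((PySem.Str.split? text "\n").getD []) [] [] (by intro x hx; cases hx)
  simp only [List.foldl_nil, pvSp, List.append_nil] at h
  exact congrArg (PySem.Str.join "\n") h
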